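-- pv_equiv track=rewrite | github.com/alexdarie/advent-of-code-2020 | day17/adonis/day17.py | cycle_task2
-- ===== SOURCE A (Python) =====
-- import copy
--
-- def generate_cube_neighbours_task2(cube):
--     neighbours = []
--
--     for i in range(3):
--         for j in range(3):
--             for k in range(3):
--                 for l in range(3):
--                     neighbours.append((cube[0] + i - 1, cube[1] + j - 1, cube[2] + k - 1, cube[3] + l - 1))
--
--     neighbours.remove(cube)
--
--     return neighbours
--
-- def cycle_task2(cubes):
--
--     new_cubes = copy.deepcopy(cubes)
--
--     for cube in cubes:
--         neighbours_cubes = generate_cube_neighbours_task2(cube)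
--
--         for neighbours_cube in neighbours_cubes:
--             if neighbours_cube not in new_cubes:
--                 new_cubes[neighbours_cube] = 0
--
--     del cubes
--
--     new_cubes_after_cycle = copy.deepcopy(new_cubes)
--
--     for cube in new_cubes:
--         neighbours_cubes = generate_cube_neighbours_task2(cube)
--
--         active_cubes = 0
--
--         for neighbours_cube in neighbours_cubes:
--             if neighbours_cube in new_cubes:
--                 if new_cubes[neighbours_cube] == 1:
--                     active_cubes += 1
--
--         if new_cubes[cube] == 1:
--             if not (active_cubes == 2 or active_cubes == 3):
--                 new_cubes_after_cycle[cube] = 0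
--         else:
--             if active_cubes == 3:
--                 new_cubes_after_cycle[cube] = 1
--
--     del new_cubes
--
--     return new_cubes_after_cycle
-- ===== SOURCE B (Python) =====
-- def _neighbours_task2(cube):
--     x, y, z, w = cube
--     return [(x + dx, y + dy, z + dz, w + dw)
--             for dx in (-1, 0, 1) for dy in (-1, 0, 1)
--             for dz in (-1, 0, 1) for dw in (-1, 0, 1)
--             if (dx, dy, dz, dw) != (0, 0, 0, 0)]
--
-- def cycle_task2(cubes):
--     # scatter pass: each active cell (value == 1) adds 1 to each of its 80 neighbours
--     counts = {}
--     for cube, value in cubes.items():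
--         if value == 1:
--             for n in _neighbours_task2(cube):
--                 counts[n] = counts.get(n, 0) + 1
--     # candidate cells: the original keys plus every neighbour of every original key
--     candidates = dict(cubes)
--     for cube in cubes:
--         for n in _neighbours_task2(cube):
--             if n not in candidates:
--                 candidates[n] = 0
--     # single gather-free pass applying the rules
--     result = {}
--     for cell, value in candidates.items():
--         c = counts.get(cell, 0)
--         if value == 1:
--             result[cell] = 1 if (c == 2 or c == 3) else 0
--         else:
--             result[cell] = 1 if c == 3 else value
--     return result
-- ===== Notes on version B (the rewrite author's own statement) =====
-- stated objective: alternative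
-- what changed: A gathers: for every candidate cell it scans its 80 neighbours and looks each one up in the grid dict; B scatters: one pass over the active cells increments a counter entry per neighbour, then a single counter-lookup pass over the candidates applies the rules.
import Mathlib
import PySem

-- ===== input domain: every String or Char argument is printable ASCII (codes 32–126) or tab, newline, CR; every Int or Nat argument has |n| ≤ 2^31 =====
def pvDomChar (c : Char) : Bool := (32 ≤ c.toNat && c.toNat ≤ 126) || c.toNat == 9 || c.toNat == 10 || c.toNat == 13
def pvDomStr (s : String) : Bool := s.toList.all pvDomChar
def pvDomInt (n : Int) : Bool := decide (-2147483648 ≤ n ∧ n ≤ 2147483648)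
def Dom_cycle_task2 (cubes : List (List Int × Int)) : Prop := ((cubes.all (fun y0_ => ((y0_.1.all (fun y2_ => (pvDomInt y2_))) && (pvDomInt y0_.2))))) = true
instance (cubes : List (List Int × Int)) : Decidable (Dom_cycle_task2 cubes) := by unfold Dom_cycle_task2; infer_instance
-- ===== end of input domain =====

-- B replaces A's per-cell gather (neighbour probes for every candidate cell) by one scatter pass over
-- the active cells building a neighbour-count table, then a single table-lookup pass over the candidates.

-- ===== PORT A =====
-- generate_cube_neighbours_task2: four nested range(3) loops appending cube+offset-1, then list.remove(cube).
-- cube[0..3] is pyGetD (exact under Pre_: keys have length 4, so the index is in range and remove finds cube).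
def nbrsA (cube : List Int) : List (List Int) :=
  let neighbours : List (List Int) :=
    (PySem.List.pyRange 0 3 1).foldl (fun acc i =>
      (PySem.List.pyRange 0 3 1).foldl (fun acc j =>
        (PySem.List.pyRange 0 3 1).foldl (fun acc k =>
          (PySem.List.pyRange 0 3 1).foldl (fun acc l =>
            acc ++ [[PySem.List.pyGetD cube 0 0 + i - 1, PySem.List.pyGetD cube 1 0 + j - 1,
                     PySem.List.pyGetD cube 2 0 + k - 1, PySem.List.pyGetD cube 3 0 + l - 1]]) acc) acc) acc) []
  (PySem.List.remove? neighbours cube).getD neighbours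

-- the input dict is the association list itself (keys unique under Pre_); new_cubes[x] is getD (key present).
def cycle_task2 (cubes : List (List Int × Int)) : List (List Int × Int) :=
  let new_cubes : PySem.Dict (List Int) Int :=
    cubes.foldl (fun nc p =>
      (nbrsA p.1).foldl (fun nc n => if nc.contains n then nc else nc.insert n 0) nc)
      (PySem.Dict.mk cubes)
  let after : PySem.Dict (List Int) Int :=
    new_cubes.keys.foldl (fun afc cube =>
      let active : Int :=
        (nbrsA cube).foldl (fun a n =>
          if new_cubes.contains n then (if new_cubes.getD n 0 == 1 then a + 1 else a) else a) 0
      if new_cubes.getD cube 0 == 1 then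
        (if !(active == 2 || active == 3) then afc.insert cube 0 else afc)
      else
        (if active == 3 then afc.insert cube 1 else afc)) new_cubes
  after.items

-- ===== PORT B =====
-- tuple unpack x,y,z,w = cube raises for length ≠ 4 (outside Pre_); comprehension over (-1,0,1)^4 minus the origin.
def nbrsB (cube : List Int) : List (List Int) :=
  match cube with
  | [x, y, z, w] =>
    ([-1, 0, 1] : List Int).flatMap (fun dx =>
      ([-1, 0, 1] : List Int).flatMap (fun dy =>
        ([-1, 0, 1] : List Int).flatMap (fun dz =>
          ([-1, 0, 1] : List Int).flatMap (fun dw =>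
            if (dx, dy, dz, dw) ≠ ((0 : Int), (0 : Int), (0 : Int), (0 : Int)) then
              [[x + dx, y + dy, z + dz, w + dw]] else []))))
  | _ => []

def cycle_task2_alt (cubes : List (List Int × Int)) : List (List Int × Int) :=
  let counts : PySem.Dict (List Int) Int :=
    cubes.foldl (fun c p =>
      if p.2 == 1 then (nbrsB p.1).foldl (fun c n => c.insert n (c.getD n 0 + 1)) c else c)
      PySem.Dict.empty
  let candidates : PySem.Dict (List Int) Int :=
    cubes.foldl (fun cd p =>
      (nbrsB p.1).foldl (fun cd n => if cd.contains n then cd else cd.insert n 0) cd)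
      (PySem.Dict.mk cubes)
  let res : PySem.Dict (List Int) Int :=
    candidates.items.foldl (fun r q =>
      let c := counts.getD q.1 0
      if q.2 == 1 then r.insert q.1 (if c == 2 || c == 3 then 1 else 0)
      else r.insert q.1 (if c == 3 then 1 else q.2)) PySem.Dict.empty
  res.items

-- ===== PRECONDITION & SPEC =====
-- Pre_ excludes keys whose length is not 4 (A raises IndexError on cube[3] or ValueError in
-- neighbours.remove) and association lists with duplicate keys, which do not represent a Python
-- dict faithfully (Python keeps the last value per key, the association list the first).
def Pre_cycle_task2 (cubes : List (List Int × Int)) : Prop :=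
  (cubes.map (·.1)).Nodup ∧ ∀ p ∈ cubes, p.1.length = 4

instance (cubes : List (List Int × Int)) : Decidable (Pre_cycle_task2 cubes) := by
  unfold Pre_cycle_task2; infer_instance

def pvWitness_cycle_task2 : (List (List Int × Int)) := [([0, 0, 0, 0], 1), ([0, 1, 0, 0], 1)]

def Spec_cycle_task2 (cubes : List (List Int × Int)) (out : List (List Int × Int)) : Prop := out = cycle_task2_alt cubes
instance (cubes : List (List Int × Int)) (out : List (List Int × Int)) : Decidable (Spec_cycle_task2 cubes out) := by unfold Spec_cycle_task2; infer_instance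

-- ===== CLAIM (what is proved, stated in full; the proofs are below) =====
def Claim_equal_cycle_task2 : Prop := ∀ (cubes : List (List Int × Int)), Dom_cycle_task2 cubes → Pre_cycle_task2 cubes → Spec_cycle_task2 cubes (cycle_task2 cubes)

-- ===== LEMMAS AND PROOFS =====

-- the 80 non-zero offsets of {-1,0,1}^4, in the traversal order of both neighbour generators
def offs : List (Int × Int × Int × Int) :=
  ([-1, 0, 1] : List Int).flatMap (fun p =>
    ([-1, 0, 1] : List Int).flatMap (fun q =>
      ([-1, 0, 1] : List Int).flatMap (fun r =>
        ([-1, 0, 1] : List Int).flatMap (fun s =>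
          if (p, q, r, s) ≠ ((0 : Int), (0 : Int), (0 : Int), (0 : Int)) then [(p, q, r, s)] else []))))

def shiftO (a b c d : Int) (o : Int × Int × Int × Int) : List Int :=
  [a + o.1, b + o.2.1, c + o.2.2.1, d + o.2.2.2]

-- A's 81 offsets (range(3)^4, lex order) and its entry shape cube[t]+i-1
def offs81 : List (Int × Int × Int × Int) :=
  ([0, 1, 2] : List Int).flatMap (fun p =>
    ([0, 1, 2] : List Int).flatMap (fun q =>
      ([0, 1, 2] : List Int).flatMap (fun r =>
        ([0, 1, 2] : List Int).flatMap (fun s => [(p, q, r, s)]))))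

def offsPre : List (Int × Int × Int × Int) := offs81.take 40
def offsPost : List (Int × Int × Int × Int) := offs81.drop 41

def shiftA (a b c d : Int) (o : Int × Int × Int × Int) : List Int :=
  [a + o.1 - 1, b + o.2.1 - 1, c + o.2.2.1 - 1, d + o.2.2.2 - 1]

lemma remove?_middle {α : Type} [BEq α] [LawfulBEq α] (l1 l2 : List α) (v : α) (h : v ∉ l1) :
    PySem.List.remove? (l1 ++ v :: l2) v = some (l1 ++ l2) := by
  induction l1 with
  | nil => simp [PySem.List.remove?_cons_self]
  | cons x t ih =>
    have hx : x ≠ v := by intro e; exact h (e ▸ List.mem_cons_self)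
    have ht : v ∉ t := fun m => h (List.mem_cons_of_mem _ m)
    simp [PySem.List.remove?_cons_of_ne _ hx, ih ht]

lemma nbrsB_eq (a b c d : Int) : nbrsB [a, b, c, d] = offs.map (shiftO a b c d) := rfl

lemma offs81_split : offs81 = offsPre ++ (1, 1, 1, 1) :: offsPost := by decide

lemma offsPre_ne_center : ∀ o ∈ offsPre, ¬(o.1 = 1 ∧ o.2.1 = 1 ∧ o.2.2.1 = 1 ∧ o.2.2.2 = 1) := by decide

lemma offs_corr :
    (offsPre ++ offsPost).map (fun o => (o.1 - 1, o.2.1 - 1, o.2.2.1 - 1, o.2.2.2 - 1)) = offs := by decide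

lemma nbrsA_pre (a b c d : Int) :
    nbrsA [a, b, c, d] =
      (PySem.List.remove? (offs81.map (shiftA a b c d)) [a, b, c, d]).getD
        (offs81.map (shiftA a b c d)) := by
  unfold nbrsA
  simp only [PySem.List.foldl_append_eq_flatMap, List.nil_append]
  rfl

lemma nbrsA_eq (a b c d : Int) : nbrsA [a, b, c, d] = offs.map (shiftO a b c d) := by
  have hnm : [a, b, c, d] ∉ offsPre.map (shiftA a b c d) := by
    intro hm
    obtain ⟨o, ho, he⟩ := List.mem_map.1 hm
    have hne := offsPre_ne_center o ho
    simp only [shiftA, List.cons.injEq, and_true] at he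
    omega
  have hc : shiftA a b c d (1, 1, 1, 1) = [a, b, c, d] := by
    simp [shiftA]
  rw [nbrsA_pre, offs81_split, List.map_append, List.map_cons, hc,
    remove?_middle _ _ _ hnm, Option.getD_some, ← List.map_append, ← offs_corr, List.map_map]
  apply List.map_congr_left
  intro o _
  simp only [Function.comp, shiftO, shiftA, List.cons.injEq, and_true]
  omega

lemma len4_shape (cube : List Int) (h : cube.length = 4) :
    ∃ a b c d : Int, cube = [a, b, c, d] := by
  rcases cube with _ | ⟨a, _ | ⟨b, _ | ⟨c, _ | ⟨d, _ | ⟨e, t⟩⟩⟩⟩⟩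
  · simp at h
  · simp at h
  · simp at h
  · simp at h
  · exact ⟨a, b, c, d, rfl⟩
  · simp only [List.length_cons] at h
    omega

lemma nbrs_eq (cube : List Int) (h : cube.length = 4) : nbrsA cube = nbrsB cube := by
  obtain ⟨a, b, c, d, rfl⟩ := len4_shape cube h
  rw [nbrsA_eq, nbrsB_eq]

lemma offs_nodup : offs.Nodup := by decide

lemma offs_neg : ∀ o ∈ offs, ((-o.1, -o.2.1, -o.2.2.1, -o.2.2.2) : Int × Int × Int × Int) ∈ offs := by decide

lemma shiftO_inj (a b c d : Int) : Function.Injective (shiftO a b c d) := by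
  rintro ⟨p, q, r, s⟩ ⟨p', q', r', s'⟩ h
  simp only [shiftO, List.cons.injEq, and_true] at h
  obtain ⟨h1, h2, h3, h4⟩ := h
  refine Prod.ext ?_ (Prod.ext ?_ (Prod.ext ?_ ?_)) <;> simp <;> omega

lemma nbrsB_nodup (cube : List Int) (h : cube.length = 4) : (nbrsB cube).Nodup := by
  obtain ⟨a, b, c, d, rfl⟩ := len4_shape cube h
  rw [nbrsB_eq]
  exact offs_nodup.map (shiftO_inj a b c d)

lemma mem_nbrsB_len {cube n : List Int} (h : cube.length = 4) (hn : n ∈ nbrsB cube) : n.length = 4 := by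
  obtain ⟨a, b, c, d, rfl⟩ := len4_shape cube h
  rw [nbrsB_eq] at hn
  obtain ⟨o, _, rfl⟩ := List.mem_map.1 hn
  rfl

lemma nbrs_symm {k c : List Int} (hk : k.length = 4) (hc : c.length = 4) :
    c ∈ nbrsB k ↔ k ∈ nbrsB c := by
  suffices hdir : ∀ k c : List Int, k.length = 4 → c ∈ nbrsB k → k ∈ nbrsB c by
    exact ⟨hdir k c hk, hdir c k hc⟩
  intro k c hk4 hmem
  obtain ⟨a, b, c', d, rfl⟩ := len4_shape k hk4
  rw [nbrsB_eq] at hmem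
  obtain ⟨o, ho, rfl⟩ := List.mem_map.1 hmem
  obtain ⟨p, q, r, t⟩ := o
  rw [show shiftO a b c' d (p, q, r, t) = [a + p, b + q, c' + r, d + t] from rfl, nbrsB_eq]
  refine List.mem_map.2 ⟨(-p, -q, -r, -t), offs_neg _ ho, ?_⟩
  simp [shiftO]

lemma count_of_nodup {α : Type} [BEq α] [LawfulBEq α] {l : List α} (h : l.Nodup) (x : α) :
    l.count x = if x ∈ l then 1 else 0 := by
  by_cases hm : x ∈ l
  · have h1 : l.count x ≤ 1 := List.nodup_iff_count_le_one.1 h x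
    have h2 : 0 < l.count x := List.count_pos_iff.2 hm
    simp only [hm, if_true]
    omega
  · simp [hm, List.count_eq_zero_of_not_mem hm]

lemma countP_or_disjoint {α : Type} (l : List α) (p q : α → Bool)
    (h : ∀ x ∈ l, ¬(p x = true ∧ q x = true)) :
    l.countP (fun x => p x || q x) = l.countP p + l.countP q := by
  induction l with
  | nil => simp
  | cons x t ih =>
    have hx := h x (List.mem_cons_self)
    have ih' := ih (fun y hy => h y (List.mem_cons_of_mem _ hy))
    by_cases hp : p x = true <;> by_cases hq : q x = true
    · exact absurd ⟨hp, hq⟩ hx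
    all_goals simp [hp, hq, ih']
    all_goals omega

-- expansion loop: adding value-0 entries for missing keys changes no "= 1" lookup
lemma fold_add0_get1 (l : List (List Int)) (d : PySem.Dict (List Int) Int) (k : List Int) :
    ((l.foldl (fun d n => if d.contains n then d else d.insert n 0) d).get? k = some 1) ↔
      d.get? k = some 1 := by
  induction l generalizing d with
  | nil => simp
  | cons n t ih =>
    simp only [List.foldl_cons]
    rw [ih]
    by_cases hc : d.contains n
    · simp [hc]
    · simp only [Bool.not_eq_true] at hc
      simp only [hc, if_neg Bool.false_ne_true]
      rw [PySem.Dict.get?_insert]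
      by_cases hk : k = n
      · subst hk
        simp [(PySem.Dict.get?_eq_none_iff_contains _ _).2 hc]
      · simp [hk]

lemma expand_get1 (cs : List (List Int × Int)) (d : PySem.Dict (List Int) Int) (k : List Int) :
    ((cs.foldl (fun nc p =>
        (nbrsB p.1).foldl (fun nc n => if nc.contains n then nc else nc.insert n 0) nc) d).get? k
        = some 1) ↔ d.get? k = some 1 := by
  induction cs generalizing d with
  | nil => simp
  | cons p t ih =>
    simp only [List.foldl_cons]
    rw [ih, fold_add0_get1]

lemma fold_add0_nodup (l : List (List Int)) (d : PySem.Dict (List Int) Int) (h : d.keys.Nodup) :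
    ((l.foldl (fun d n => if d.contains n then d else d.insert n 0) d)).keys.Nodup := by
  induction l generalizing d with
  | nil => exact h
  | cons n t ih =>
    simp only [List.foldl_cons]
    apply ih
    by_cases hc : d.contains n
    · simpa [hc]
    · simp only [Bool.not_eq_true] at hc
      simp only [hc, if_neg Bool.false_ne_true]
      exact PySem.Dict.nodup_keys_insert d n 0 h

lemma expand_nodup (cs : List (List Int × Int)) (d : PySem.Dict (List Int) Int) (h : d.keys.Nodup) :
    ((cs.foldl (fun nc p =>
        (nbrsB p.1).foldl (fun nc n => if nc.contains n then nc else nc.insert n 0) nc) d)).keys.Nodup := by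
  induction cs generalizing d with
  | nil => exact h
  | cons p t ih =>
    simp only [List.foldl_cons]
    exact ih _ (fold_add0_nodup _ _ h)

lemma fold_add0_len (l : List (List Int)) (d : PySem.Dict (List Int) Int)
    (hl : ∀ n ∈ l, n.length = 4) (hd : ∀ k ∈ d.keys, k.length = 4) :
    ∀ k ∈ ((l.foldl (fun d n => if d.contains n then d else d.insert n 0) d)).keys, k.length = 4 := by
  induction l generalizing d with
  | nil => exact hd
  | cons n t ih =>
    simp only [List.foldl_cons]
    apply ih _ (fun m hm => hl m (List.mem_cons_of_mem _ hm))
    intro k hk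
    by_cases hc : d.contains n
    · exact hd k (by simpa [hc] using hk)
    · simp only [Bool.not_eq_true] at hc
      simp only [hc, if_neg Bool.false_ne_true] at hk
      rcases (PySem.Dict.mem_keys_insert _ _ _ _).1 hk with rfl | hk'
      · exact hl k (List.mem_cons_self)
      · exact hd k hk' 

lemma expand_len (cs : List (List Int × Int)) (d : PySem.Dict (List Int) Int)
    (hcs : ∀ p ∈ cs, p.1.length = 4) (hd : ∀ k ∈ d.keys, k.length = 4) :
    ∀ k ∈ ((cs.foldl (fun nc p =>
        (nbrsB p.1).foldl (fun nc n => if nc.contains n then nc else nc.insert n 0) nc) d)).keys,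
      k.length = 4 := by
  induction cs generalizing d with
  | nil => exact hd
  | cons p t ih =>
    simp only [List.foldl_cons]
    exact ih _ (fun q hq => hcs q (List.mem_cons_of_mem _ hq))
      (fold_add0_len _ _ (fun n hn => mem_nbrsB_len (hcs p List.mem_cons_self) hn) hd)

lemma expand_AB (cs : List (List Int × Int)) (d : PySem.Dict (List Int) Int)
    (hcs : ∀ p ∈ cs, p.1.length = 4) :
    cs.foldl (fun nc p =>
        (nbrsA p.1).foldl (fun nc n => if nc.contains n then nc else nc.insert n 0) nc) d =
      cs.foldl (fun nc p =>
        (nbrsB p.1).foldl (fun nc n => if nc.contains n then nc else nc.insert n 0) nc) d := by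
  apply PySem.List.foldl_congr_mem
  intro acc p hp
  rw [nbrs_eq _ (hcs p hp)]

-- scatter pass = gather count
lemma counts_getD (cs : List (List Int × Int)) (d : PySem.Dict (List Int) Int) (k : List Int)
    (hnd : (cs.map (·.1)).Nodup) (hlen : ∀ p ∈ cs, p.1.length = 4) (hk : k.length = 4) :
    (cs.foldl (fun c p =>
        if p.2 == 1 then (nbrsB p.1).foldl (fun c n => c.insert n (c.getD n 0 + 1)) c else c)
        d).getD k 0
      = d.getD k 0 + ((nbrsB k).countP (fun n => decide ((n, (1 : Int)) ∈ cs)) : Int) := by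
  induction cs generalizing d with
  | nil => simp
  | cons p t ih =>
    have hp4 : p.1.length = 4 := hlen p List.mem_cons_self
    have hnd2 : (p.1 :: t.map (·.1)).Nodup := by simpa using hnd
    have hpt : p.1 ∉ t.map (·.1) := (List.nodup_cons.1 hnd2).1
    have hnd' : (t.map (·.1)).Nodup := (List.nodup_cons.1 hnd2).2
    have hlen' : ∀ q ∈ t, q.1.length = 4 := fun q hq => hlen q (List.mem_cons_of_mem _ hq)
    simp only [List.foldl_cons]
    by_cases h1 : p.2 = 1
    · have hb : (p.2 == 1) = true := by simp [h1]
      rw [if_pos hb, ih _ hnd' hlen', PySem.Dict.getD_foldl_insert_add_one]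
      have hsplit : (nbrsB k).countP (fun n => decide ((n, (1 : Int)) ∈ p :: t))
          = (nbrsB k).countP (fun n => decide (n = p.1))
            + (nbrsB k).countP (fun n => decide ((n, (1 : Int)) ∈ t)) := by
        rw [← countP_or_disjoint _ _ _ (by
          intro x hx ⟨ha, hb'⟩
          exact hpt (List.mem_map.2 ⟨(x, 1), of_decide_eq_true hb', by
            simp [of_decide_eq_true ha]⟩))]
        apply List.countP_congr
        intro x hx
        have hiff : ((x, (1 : Int)) ∈ p :: t) ↔ (x = p.1 ∨ (x, (1 : Int)) ∈ t) := by
          simp only [List.mem_cons, Prod.ext_iff]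
          constructor
          · rintro (⟨hx1, _⟩ | hm)
            · exact Or.inl hx1
            · exact Or.inr hm
          · rintro (hx1 | hm)
            · exact Or.inl ⟨hx1, h1.symm⟩
            · exact Or.inr hm
        simp [hiff]
      have hc1 : (nbrsB k).countP (fun n => decide (n = p.1))
          = (nbrsB k).count p.1 := by
        apply List.countP_congr
        intro x hx
        simp [beq_iff_eq]
      have hc2 : (nbrsB k).count p.1 = (nbrsB p.1).count k := by
        rw [count_of_nodup (nbrsB_nodup k hk) p.1, count_of_nodup (nbrsB_nodup p.1 hp4) k]
        simp only [nbrs_symm hk hp4]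
      rw [hsplit, hc1, hc2]
      push_cast
      ring
    · have hb : (p.2 == 1) = false := by simp [h1]
      rw [if_neg (by simp [hb]), ih _ hnd' hlen']
      have hcg : (nbrsB k).countP (fun n => decide ((n, (1 : Int)) ∈ p :: t))
          = (nbrsB k).countP (fun n => decide ((n, (1 : Int)) ∈ t)) := by
        apply List.countP_congr
        intro x hx
        have hiff : ((x, (1 : Int)) ∈ p :: t) ↔ ((x, (1 : Int)) ∈ t) := by
          simp only [List.mem_cons, Prod.ext_iff]
          constructor
          · rintro (⟨_, h12⟩ | hm)
            · exact absurd h12.symm h1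
            · exact hm
          · exact fun hm => Or.inr hm
        simp [hiff]
      rw [hcg]

-- writing into a dict at keys it contains rewrites the items pointwise
lemma foldl_update_items (cond : List Int → Bool) (val : List Int → Int) :
    ∀ (ks : List (List Int)) (d : PySem.Dict (List Int) Int),
      (∀ k ∈ ks, d.contains k = true) →
      ((ks.foldl (fun a k => if cond k then a.insert k (val k) else a) d)).items
        = d.items.map (fun p => if p.1 ∈ ks ∧ cond p.1 then (p.1, val p.1) else p) := by
  intro ks
  induction ks with
  | nil => intro d _; simp
  | cons k t ih =>
    intro d hcont
    have hk := hcont k List.mem_cons_self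
    simp only [List.foldl_cons]
    have hd' : (if cond k then d.insert k (val k) else d).items
        = d.items.map (fun p => if p.1 = k ∧ cond k then (k, val k) else p) := by
      by_cases hc : cond k
      · simp only [hc, if_true, and_true]
        rw [PySem.Dict.items_insert_of_contains _ _ hk]
        apply List.map_congr_left
        intro p _
        by_cases h1 : p.1 = k <;> simp [h1]
      · simp [hc]
    have hcont' : ∀ x ∈ t, (if cond k then d.insert k (val k) else d).contains x = true := by
      intro x hx
      have hdx := hcont x (List.mem_cons_of_mem _ hx)
      by_cases hc : cond k <;> simp [hc, PySem.Dict.contains_insert, hdx]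
    rw [ih _ hcont', hd', List.map_map]
    apply List.map_congr_left
    intro p _
    simp only [Function.comp_apply]
    by_cases h1 : p.1 = k <;> by_cases h2 : cond p.1 <;> by_cases h3 : p.1 ∈ t <;>
      simp_all [List.mem_cons]

def gatherA (E : PySem.Dict (List Int) Int) (k : List Int) : Int :=
  (nbrsA k).foldl (fun a n =>
    if E.contains n then (if E.getD n 0 == 1 then a + 1 else a) else a) 0

def condA (E : PySem.Dict (List Int) Int) (k : List Int) : Bool :=
  if E.getD k 0 == 1 then !(gatherA E k == 2 || gatherA E k == 3) else (gatherA E k == 3)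

def valA (E : PySem.Dict (List Int) Int) (k : List Int) : Int :=
  if E.getD k 0 == 1 then 0 else 1

lemma stepA_eq (E : PySem.Dict (List Int) Int) :
    (fun (afc : PySem.Dict (List Int) Int) cube =>
      let active : Int :=
        (nbrsA cube).foldl (fun a n =>
          if E.contains n then (if E.getD n 0 == 1 then a + 1 else a) else a) 0
      if E.getD cube 0 == 1 then
        (if !(active == 2 || active == 3) then afc.insert cube 0 else afc)
      else
        (if active == 3 then afc.insert cube 1 else afc))
    = fun afc cube => if condA E cube then afc.insert cube (valA E cube) else afc := by
  funext afc cube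
  simp only [condA, valA, gatherA]
  split_ifs <;> simp_all

def valB (counts : PySem.Dict (List Int) Int) (q : List Int × Int) : Int :=
  if q.2 == 1 then (if counts.getD q.1 0 == 2 || counts.getD q.1 0 == 3 then 1 else 0)
  else (if counts.getD q.1 0 == 3 then 1 else q.2)

lemma stepB_eq (counts : PySem.Dict (List Int) Int) :
    (fun (r : PySem.Dict (List Int) Int) q =>
      let c := counts.getD q.1 0
      if q.2 == 1 then r.insert q.1 (if c == 2 || c == 3 then 1 else 0)
      else r.insert q.1 (if c == 3 then 1 else q.2))
    = fun r q => r.insert q.1 (valB counts q) := by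
  funext r q
  simp only [valB]
  split_ifs <;> rfl

-- ===== VERDICT (by name: the statement is the Claim_ definition above) =====
theorem cycle_task2_spec : Claim_equal_cycle_task2 := by
  intro cubes _hdom hpre
  obtain ⟨hnd, hlen⟩ := hpre
  unfold Spec_cycle_task2
  simp only [cycle_task2, cycle_task2_alt]
  rw [expand_AB cubes (PySem.Dict.mk cubes) hlen]
  set E := cubes.foldl (fun nc p =>
      (nbrsB p.1).foldl (fun nc n => if nc.contains n then nc else nc.insert n 0) nc)
      (PySem.Dict.mk cubes) with hE
  set counts : PySem.Dict (List Int) Int := cubes.foldl (fun c p =>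
      if p.2 == 1 then (nbrsB p.1).foldl (fun c n => c.insert n (c.getD n 0 + 1)) c else c)
      PySem.Dict.empty with hcounts
  have hmkitems : (PySem.Dict.mk cubes).items = cubes := rfl
  have hmkkeys : (PySem.Dict.mk cubes).keys = cubes.map (·.1) := rfl
  have hndmk : (PySem.Dict.mk cubes).keys.Nodup := by rw [hmkkeys]; exact hnd
  have hndE : E.keys.Nodup := expand_nodup cubes _ hndmk
  have hlenE : ∀ k ∈ E.keys, k.length = 4 := by
    apply expand_len cubes _ hlen
    rw [hmkkeys]
    intro k hk
    obtain ⟨p, hp, rfl⟩ := List.mem_map.1 hk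
    exact hlen p hp
  have hget1 : ∀ k, E.get? k = some 1 ↔ (k, (1 : Int)) ∈ cubes := by
    intro k
    rw [hE, expand_get1]
    rw [PySem.Dict.get?_eq_some_iff_mem_items _ _ _ hndmk, hmkitems]
  have hcount : ∀ k ∈ E.keys, gatherA E k = counts.getD k 0 := by
    intro k hk
    have hk4 := hlenE k hk
    unfold gatherA
    rw [nbrs_eq k hk4]
    have hfun : (fun (a : Int) n =>
        if E.contains n then (if E.getD n 0 == 1 then a + 1 else a) else a)
        = fun (a : Int) n => if E.get? n = some 1 then a + 1 else a := by
      funext a n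
      by_cases hc : E.contains n
      · rcases ho : E.get? n with _ | v
        · rw [(PySem.Dict.get?_eq_none_iff_contains _ _).1 ho] at hc
          simp at hc
        · have hv : E.getD n 0 = v := PySem.Dict.getD_of_get?_eq_some E 0 ho
          simp [hc, hv]
      · have hcf : E.contains n = false := by simpa using hc
        have ho := (PySem.Dict.get?_eq_none_iff_contains _ _).2 hcf
        simp [hcf, ho]
    rw [hfun, PySem.List.foldl_ite_add_one, hcounts,
      counts_getD cubes _ k hnd hlen hk4]
    simp only [PySem.Dict.getD_empty, zero_add]
    congr 1
    apply List.countP_congr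
    intro x _
    simp [hget1 x]
  rw [stepA_eq E, stepB_eq counts]
  have hcontall : ∀ k ∈ E.keys, E.contains k = true := by
    intro k hk
    exact (PySem.Dict.contains_iff_mem_keys _ _).2 hk
  rw [foldl_update_items (condA E) (valA E) E.keys E hcontall]
  have hkeysitems : E.keys = E.items.map (·.1) := rfl
  have hfresh : ∀ q ∈ E.items, (PySem.Dict.empty : PySem.Dict (List Int) Int).contains q.1 = false := by
    intro q _
    simp [PySem.Dict.contains_empty]
  rw [PySem.Dict.items_foldl_insert_fresh E.items (·.1) (valB counts) _ hfresh
    (by rw [← hkeysitems]; exact hndE)]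
  rw [show (PySem.Dict.empty : PySem.Dict (List Int) Int).items = ([] : List (List Int × Int)) from rfl]
  simp only [List.nil_append]
  apply List.map_congr_left
  intro p hp
  have hpk : p.1 ∈ E.keys := PySem.Dict.mem_keys_of_mem_items _ hp
  have hv : E.getD p.1 0 = p.2 := PySem.Dict.getD_of_mem_items _ hp hndE 0
  have hcnt := hcount p.1 hpk
  simp only [hpk, true_and, condA, valA, valB, hcnt, hv]
  by_cases hb : (p.2 == 1) = true
  · have hp2 : p.2 = 1 := by simpa using hb
    by_cases hc : (counts.getD p.1 0 == 2 || counts.getD p.1 0 == 3) = true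
    · simp [hc, Prod.ext_iff, hp2]
    · simp [hb, hc]
  · have hbf : (p.2 == 1) = false := by simpa using hb
    by_cases hc : (counts.getD p.1 0 == 3) = true
    · simp [hbf, hc]
    · simp [hbf, hc]
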